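-- pv_equiv track=rewrite | github.com/MengStar-L/TelDriveManager | app/modules/pikpak/routes.py | _normalize_teldrive_path
-- ===== SOURCE A (Python) =====
-- def _normalize_teldrive_path(path: str) -> str:
--     value = str(path or "").strip().replace("\\", "/")
--     if not value:
--         return "/"
--     if not value.startswith("/"):
--         value = "/" + value
--     while "//" in value:
--         value = value.replace("//", "/")
--     return value.rstrip("/") or "/"
-- ===== SOURCE B (Python) =====
-- def _normalize_teldrive_path(path: str) -> str:
--     value = str(path or "").strip().replace("\\", "/")
--     out = "/"
--     prev = "/"
--     for ch in value:
--         if ch != "/" or prev != "/":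
--             out += ch
--             prev = ch
--     if prev == "/" and len(out) > 1:
--         out = out[:-1]
--     return out
-- ===== Notes on version B (the rewrite author's own statement) =====
-- stated objective: alternative
-- what changed: Replaces A's multi-pass control flow (startswith guard, while-loop of global '//'→'/' replaces, rstrip('/') with an or-fallback) by a single left-to-right scan that copies characters while skipping a '/' whose previously emitted character was '/', then drops one trailing slash.
import Mathlib
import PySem

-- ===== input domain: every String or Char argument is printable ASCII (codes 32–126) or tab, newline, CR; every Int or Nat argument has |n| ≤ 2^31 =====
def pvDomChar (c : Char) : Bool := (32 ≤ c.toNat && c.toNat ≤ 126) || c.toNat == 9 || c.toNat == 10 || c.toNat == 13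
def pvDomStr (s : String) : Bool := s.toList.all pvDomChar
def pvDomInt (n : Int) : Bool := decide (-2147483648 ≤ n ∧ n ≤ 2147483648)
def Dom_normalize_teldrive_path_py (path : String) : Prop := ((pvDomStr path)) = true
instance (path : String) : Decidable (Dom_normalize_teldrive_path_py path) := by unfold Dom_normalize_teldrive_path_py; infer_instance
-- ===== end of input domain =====

-- B replaces A's startswith guard + while-replace('//','/') loop + rstrip('/')-or-'/' by one
-- left-to-right scan that skips a '/' following an emitted '/', then drops one trailing slash
-- (objective: alternative decomposition, single pass).

-- ===== PORT A =====
-- Structural image of one full pass of value.replace("//", "/") (used only to prove that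
-- A's while loop terminates; the port itself calls PySem.Chars.replace).
def pvRep : List Char → List Char
  | [] => []
  | [c] => [c]
  | a :: b :: t => if a = '/' ∧ b = '/' then '/' :: pvRep t else a :: pvRep (b :: t)

-- "value has two adjacent slashes" (structural image of '"//" in value').
def pvDD : List Char → Bool
  | [] => false
  | [_] => false
  | a :: b :: t => (decide (a = '/') && decide (b = '/')) || pvDD (b :: t)

theorem pvRep_go (fuel : Nat) (l acc : List Char) (h : l.length ≤ fuel) :
    PySem.Chars.replace.go ['/','/'] ['/'] fuel l acc = acc.reverse ++ pvRep l := by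
  induction fuel generalizing l acc with
  | zero =>
    have hl : l = [] := List.eq_nil_of_length_eq_zero (Nat.le_zero.mp h)
    subst hl
    rw [PySem.Chars.replace.go]
    simp [pvRep]
  | succ f ih =>
    match l with
    | [] =>
      rw [PySem.Chars.replace.go]
      all_goals first | simp [pvRep] | omega
    | [c] =>
      rw [PySem.Chars.replace.go]
      rw [if_neg (by simp [List.isPrefixOf])]
      rw [ih [] (c :: acc) (by simp)]
      simp [pvRep]
    | a :: b :: t =>
      rw [PySem.Chars.replace.go]
      by_cases hab : a = '/' ∧ b = '/'
      · rw [if_pos (by simp [List.isPrefixOf, hab.1, hab.2])]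
        have hd : List.drop (['/','/'] : List Char).length (a :: b :: t) = t := rfl
        rw [hd, ih t _ (by simp at h ⊢; omega)]
        simp [pvRep, hab.1, hab.2]
      · rw [if_neg (by simp [List.isPrefixOf]; intro h1 h2; exact hab ⟨h1.symm, h2.symm⟩)]
        rw [ih (b :: t) (a :: acc) (by simp at h ⊢; omega)]
        simp [pvRep, hab]

theorem pvReplace_eq (v : List Char) :
    PySem.Chars.replace v ['/','/'] ['/'] = pvRep v := by
  rw [PySem.Chars.replace]
  simp only [List.isEmpty_cons, if_false, Bool.false_eq_true]
  exact pvRep_go v.length v [] le_rfl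

theorem pvInfix_iff (v : List Char) : ['/','/'] <:+: v ↔ pvDD v = true := by
  induction v with
  | nil => simp [pvDD]
  | cons a t ih =>
    rw [List.infix_cons_iff]
    cases t with
    | nil =>
      simp only [pvDD]
      constructor
      · rintro (hp | hi)
        · simpa using hp.length_le
        · simpa using hi
      · simp
    | cons b t' =>
      simp only [pvDD, List.cons_prefix_cons, Bool.or_eq_true, Bool.and_eq_true, decide_eq_true_eq]
      rw [ih]
      constructor
      · rintro (⟨h1, h2, _⟩ | h)
        · exact Or.inl ⟨h1.symm, h2.symm⟩
        · exact Or.inr h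
      · rintro (⟨h1, h2⟩ | h)
        · exact Or.inl ⟨h1.symm, h2.symm, by simp⟩
        · exact Or.inr h

theorem pvIsIn_eq_pvDD (v : List Char) : PySem.Chars.isIn ['/','/'] v = pvDD v := by
  cases h : pvDD v with
  | true => exact (PySem.Chars.isIn_iff_infix _ _).mpr ((pvInfix_iff v).mpr h)
  | false =>
    exact (PySem.Chars.isIn_eq_false_iff _ _).mpr (fun hc => by
      rw [pvInfix_iff, h] at hc; exact Bool.false_ne_true hc)

theorem pvRep_length_le (v : List Char) : (pvRep v).length ≤ v.length := by
  induction v using pvRep.induct with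
  | case1 => simp [pvRep]
  | case2 c => simp [pvRep]
  | case3 a b t h ih => simp [pvRep, h]; omega
  | case4 a b t h ih => simp [pvRep, h]; simpa using ih

theorem pvRep_length_lt (v : List Char) (h : pvDD v = true) :
    (pvRep v).length < v.length := by
  induction v using pvRep.induct with
  | case1 => simp [pvDD] at h
  | case2 c => simp [pvDD] at h
  | case3 a b t hab ih =>
    have := pvRep_length_le t
    simp [pvRep, hab]; omega
  | case4 a b t hab ih =>
    simp [pvDD] at h
    rcases h with ⟨ha, hb⟩ | h
    · exact absurd ⟨ha, hb⟩ hab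
    · simp [pvRep, hab]; simpa using ih h

theorem pvALoop_dec (v : List Char) (h : PySem.Chars.isIn ['/','/'] v = true) :
    (PySem.Chars.replace v ['/','/'] ['/']).length < v.length := by
  rw [pvReplace_eq]
  exact pvRep_length_lt v (by rw [← pvIsIn_eq_pvDD]; exact h)

-- Literal port of A's 'while "//" in value: value = value.replace("//", "/")'.
def pvALoop (v : List Char) : List Char :=
  if h : PySem.Chars.isIn ['/','/'] v = true then
    pvALoop (PySem.Chars.replace v ['/','/'] ['/'])
  else v
termination_by v.length
decreasing_by exact pvALoop_dec v h

-- value.rstrip("/") : PySem has no one-sided rstrip with a chars argument; this is exact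
-- (drop the trailing characters equal to '/').
def pvRstripSlash (l : List Char) : List Char :=
  (l.reverse.dropWhile (fun c => c == '/')).reverse

def normalize_teldrive_path_py (path : String) : String :=
  -- str(path or "") is path itself for every str argument (falsy str = ""), so only
  -- strip/replace remain of the first line.
  let value := PySem.Chars.replace (PySem.Chars.strip path.toList) ['\\'] ['/']
  if value = [] then "/"
  else
    let value := if ¬ (PySem.Chars.startswith value ['/'] = true) then '/' :: value else value
    let value := pvALoop value
    let r := pvRstripSlash value
    if r = [] then "/" else String.mk r

-- ===== PORT B =====
def normalize_teldrive_path_py_alt (path : String) : String :=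
  let value := PySem.Chars.replace (PySem.Chars.strip path.toList) ['\\'] ['/']
  -- the for loop over value with state (out, prev), started at ("/", "/")
  let st := value.foldl
    (fun (st : List Char × Char) ch =>
      if ch ≠ '/' ∨ st.2 ≠ '/' then (st.1 ++ [ch], ch) else st)
    (['/'], '/')
  -- if prev == "/" and len(out) > 1: out = out[:-1]
  let out := if st.2 = '/' ∧ 1 < st.1.length then PySem.List.slice st.1 none (some (-1)) else st.1
  String.mk out

-- ===== PRECONDITION & SPEC =====
def Spec_normalize_teldrive_path_py (path : String) (out : String) : Prop := out = normalize_teldrive_path_py_alt path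
instance (path : String) (out : String) : Decidable (Spec_normalize_teldrive_path_py path out) := by unfold Spec_normalize_teldrive_path_py; infer_instance

-- ===== CLAIM (what is proved, stated in full; the proofs are below) =====
def Claim_equal_normalize_teldrive_path_py : Prop := ∀ (path : String), Dom_normalize_teldrive_path_py path → Spec_normalize_teldrive_path_py path (normalize_teldrive_path_py path)

-- ===== LEMMAS AND PROOFS =====

-- Full collapse of adjacent-slash pairs (the fixed point of A's while loop).
def pvSq : List Char → List Char
  | [] => []
  | [c] => [c]
  | a :: b :: t => if a = '/' ∧ b = '/' then pvSq (b :: t) else a :: pvSq (b :: t)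

theorem pvSq_noDD (v : List Char) (h : pvDD v = false) : pvSq v = v := by
  induction v using pvSq.induct with
  | case1 => rfl
  | case2 c => rfl
  | case3 a b t hab ih =>
    exfalso
    simp [pvDD, hab.1, hab.2] at h
  | case4 a b t hab ih =>
    have h' : pvDD (b :: t) = false := by
      simp only [pvDD, Bool.or_eq_false_iff] at h
      exact h.2
    simp only [pvSq]
    rw [if_neg hab, ih h']

theorem pvSq_rep' (v : List Char) : ∀ (c : Char), pvSq (c :: pvRep v) = pvSq (c :: v) := by
  induction v using pvRep.induct with
  | case1 => intro c; rfl
  | case2 d => intro c; rfl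
  | case3 a b t hab ih =>
    intro c
    obtain ⟨ha, hb⟩ := hab; subst ha; subst hb
    rw [show pvRep ('/' :: '/' :: t) = '/' :: pvRep t from by simp [pvRep]]
    by_cases hc : c = '/'
    · subst hc
      rw [show pvSq ('/' :: '/' :: pvRep t) = pvSq ('/' :: pvRep t) from by simp [pvSq]]
      rw [show pvSq ('/' :: '/' :: '/' :: t) = pvSq ('/' :: '/' :: t) from by simp [pvSq]]
      rw [show pvSq (('/' : Char) :: '/' :: t) = pvSq ('/' :: t) from by simp [pvSq]]
      exact ih '/'
    · rw [show pvSq (c :: '/' :: pvRep t) = c :: pvSq ('/' :: pvRep t) from by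
        simp only [pvSq]; rw [if_neg (fun hx => hc hx.1)]]
      rw [show pvSq (c :: '/' :: '/' :: t) = c :: pvSq ('/' :: '/' :: t) from by
        simp only [pvSq]; rw [if_neg (fun hx => hc hx.1)]]
      rw [show pvSq (('/' : Char) :: '/' :: t) = pvSq ('/' :: t) from by simp [pvSq]]
      rw [ih '/']
  | case4 a b t hab ih =>
    intro c
    rw [show pvRep (a :: b :: t) = a :: pvRep (b :: t) from by
      simp only [pvRep]; rw [if_neg hab]]
    by_cases hca : c = '/' ∧ a = '/'
    · rw [show pvSq (c :: a :: pvRep (b :: t)) = pvSq (a :: pvRep (b :: t)) from by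
        simp only [pvSq]; rw [if_pos hca]]
      rw [show pvSq (c :: a :: b :: t) = pvSq (a :: b :: t) from by
        simp only [pvSq]; rw [if_pos hca]]
      exact ih a
    · rw [show pvSq (c :: a :: pvRep (b :: t)) = c :: pvSq (a :: pvRep (b :: t)) from by
        simp only [pvSq]; rw [if_neg hca]]
      rw [show pvSq (c :: a :: b :: t) = c :: pvSq (a :: b :: t) from by
        simp only [pvSq]; rw [if_neg hca]]
      rw [ih a]

theorem pvSq_rep (v : List Char) : pvSq (pvRep v) = pvSq v := by
  induction v using pvRep.induct with
  | case1 => rfl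
  | case2 c => rfl
  | case3 a b t hab ih =>
    obtain ⟨ha, hb⟩ := hab; subst ha; subst hb
    rw [show pvRep ('/' :: '/' :: t) = '/' :: pvRep t from by simp [pvRep]]
    rw [pvSq_rep' t '/']
    rw [show pvSq (('/' : Char) :: '/' :: t) = pvSq ('/' :: t) from by simp [pvSq]]
  | case4 a b t hab ih =>
    rw [show pvRep (a :: b :: t) = a :: pvRep (b :: t) from by
      simp only [pvRep]; rw [if_neg hab]]
    rw [pvSq_rep' (b :: t) a]

theorem pvALoop_eq_aux : ∀ (n : Nat) (v : List Char), v.length ≤ n → pvALoop v = pvSq v := by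
  intro n
  induction n with
  | zero =>
    intro v hv
    have hv0 : v = [] := List.eq_nil_of_length_eq_zero (Nat.le_zero.mp hv)
    subst hv0
    rw [pvALoop]
    simp [pvIsIn_eq_pvDD, pvDD, pvSq]
  | succ m ih =>
    intro v hv
    rw [pvALoop]
    by_cases h : PySem.Chars.isIn ['/','/'] v = true
    · rw [dif_pos h, pvReplace_eq]
      have hdd : pvDD v = true := by rw [← pvIsIn_eq_pvDD]; exact h
      rw [ih (pvRep v) (by have := pvRep_length_lt v hdd; omega)]
      exact pvSq_rep v
    · rw [dif_neg h]
      have hdd : pvDD v = false := by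
        rw [← pvIsIn_eq_pvDD]; exact Bool.eq_false_iff.mpr h
      exact (pvSq_noDD v hdd).symm

theorem pvALoop_eq (v : List Char) : pvALoop v = pvSq v :=
  pvALoop_eq_aux v.length v le_rfl

-- The scan B's for loop performs after the initial "/" (prev = last emitted char).
def pvScan : Char → List Char → List Char
  | _, [] => []
  | prev, c :: t => if c = '/' ∧ prev = '/' then pvScan prev t else c :: pvScan c t

theorem pvFold (v : List Char) : ∀ (out : List Char) (prev : Char),
    v.foldl (fun (st : List Char × Char) ch =>
        if ch ≠ '/' ∨ st.2 ≠ '/' then (st.1 ++ [ch], ch) else st) (out, prev)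
      = (out ++ pvScan prev v, (pvScan prev v).getLastD prev) := by
  induction v with
  | nil => intro out prev; simp [pvScan]
  | cons c t ih =>
    intro out prev
    simp only [List.foldl_cons]
    by_cases h : c = '/' ∧ prev = '/'
    · rw [if_neg (by tauto)]
      rw [ih]
      rw [show pvScan prev (c :: t) = pvScan prev t from by
        simp only [pvScan]; rw [if_pos h]]
    · rw [if_pos (by tauto)]
      rw [ih]
      rw [show pvScan prev (c :: t) = c :: pvScan c t from by
        simp only [pvScan]; rw [if_neg h]]
      rw [List.getLastD_cons]
      simp

theorem pvSq_cons_scan (v : List Char) : ∀ (c : Char), pvSq (c :: v) = c :: pvScan c v := by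
  induction v with
  | nil => intro c; rfl
  | cons d t ih =>
    intro c
    by_cases h : c = '/' ∧ d = '/'
    · obtain ⟨hc, hd⟩ := h; subst hc; subst hd
      rw [show pvSq (('/' : Char) :: '/' :: t) = pvSq ('/' :: t) from by simp [pvSq]]
      rw [ih '/']
      rw [show pvScan '/' ('/' :: t) = pvScan '/' t from by simp [pvScan]]
    · rw [show pvSq (c :: d :: t) = c :: pvSq (d :: t) from by
        simp only [pvSq]; rw [if_neg h]]
      rw [ih d]
      rw [show pvScan c (d :: t) = d :: pvScan d t from by
        simp only [pvScan]; rw [if_neg (fun hx => h ⟨hx.2, hx.1⟩)]]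

theorem pvDD_scan (v : List Char) : ∀ (c : Char), pvDD (c :: pvScan c v) = false := by
  induction v with
  | nil => intro c; rfl
  | cons d t ih =>
    intro c
    by_cases h : d = '/' ∧ c = '/'
    · rw [show pvScan c (d :: t) = pvScan c t from by simp only [pvScan]; rw [if_pos h]]
      exact ih c
    · rw [show pvScan c (d :: t) = d :: pvScan d t from by simp only [pvScan]; rw [if_neg h]]
      have h1 : (decide (c = '/') && decide (d = '/')) = false := by
        by_cases hd : d = '/'
        · have hc : ¬ c = '/' := fun hc => h ⟨hd, hc⟩
          simp [hc]
        · simp [hd]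
      calc pvDD (c :: d :: pvScan d t)
          = ((decide (c = '/') && decide (d = '/')) || pvDD (d :: pvScan d t)) := by
            simp only [pvDD]
        _ = false := by rw [h1, ih d]; rfl

theorem pvDD_append_pair : ∀ (l : List Char), pvDD (l ++ ['/','/']) = true := by
  intro l
  induction l with
  | nil => decide
  | cons a t ih =>
    cases t with
    | nil => simp [pvDD]
    | cons b t' =>
      rw [show (a :: b :: t') ++ ['/','/'] = a :: b :: (t' ++ ['/','/']) from by simp]
      have hu : pvDD (a :: b :: (t' ++ ['/','/']))
          = ((decide (a = '/') && decide (b = '/')) || pvDD (b :: (t' ++ ['/','/']))) := by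
        simp only [pvDD]
      rw [hu, show b :: (t' ++ ['/','/']) = (b :: t') ++ ['/','/'] from by simp, ih]
      simp

theorem pvRstrip_nil : pvRstripSlash [] = [] := rfl

theorem pvRstrip_concat_slash (l : List Char) :
    pvRstripSlash (l ++ ['/']) = pvRstripSlash l := by
  simp [pvRstripSlash]

theorem pvRstrip_concat_ne (l : List Char) (a : Char) (h : a ≠ '/') :
    pvRstripSlash (l ++ [a]) = l ++ [a] := by
  simp [pvRstripSlash, h]

theorem pvSlice_neg_one (l : List Char) (h : l ≠ []) :
    PySem.List.slice l none (some (-1)) = l.dropLast := by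
  have hl : 1 ≤ l.length := List.length_pos_iff.mpr h
  simp only [PySem.List.slice, PySem.List.clampIdx]
  rw [if_pos (by norm_num), if_neg (by push_cast; omega)]
  rw [show ((l.length : Int) + (-1)).toNat = l.length - 1 from by omega]
  rw [List.dropLast_eq_take]
  simp

theorem pvMain (v : List Char) :
    (if v = [] then ("/" : String) else
      if pvRstripSlash (pvALoop
          (if ¬ (PySem.Chars.startswith v ['/'] = true) then '/' :: v else v)) = [] then "/"
      else String.mk (pvRstripSlash (pvALoop
          (if ¬ (PySem.Chars.startswith v ['/'] = true) then '/' :: v else v))))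
    = String.mk
        (if (v.foldl (fun (st : List Char × Char) ch =>
              if ch ≠ '/' ∨ st.2 ≠ '/' then (st.1 ++ [ch], ch) else st) (['/'], '/')).2 = '/' ∧
            1 < (v.foldl (fun (st : List Char × Char) ch =>
              if ch ≠ '/' ∨ st.2 ≠ '/' then (st.1 ++ [ch], ch) else st) (['/'], '/')).1.length then
          PySem.List.slice (v.foldl (fun (st : List Char × Char) ch =>
              if ch ≠ '/' ∨ st.2 ≠ '/' then (st.1 ++ [ch], ch) else st) (['/'], '/')).1 none (some (-1))
        else (v.foldl (fun (st : List Char × Char) ch =>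
              if ch ≠ '/' ∨ st.2 ≠ '/' then (st.1 ++ [ch], ch) else st) (['/'], '/')).1) := by
  rw [pvFold v ['/'] '/']
  simp only [List.singleton_append]
  have hw : pvALoop (if ¬ (PySem.Chars.startswith v ['/'] = true) then '/' :: v else v)
      = '/' :: pvScan '/' v := by
    rw [pvALoop_eq]
    by_cases hsw : PySem.Chars.startswith v ['/'] = true
    · rw [if_neg (by simp [hsw])]
      obtain ⟨t, rfl⟩ : ∃ t, v = '/' :: t := by
        obtain ⟨r, hr⟩ := (PySem.Chars.startswith_iff v ['/']).mp hsw
        exact ⟨r, by rw [← hr]; rfl⟩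
      rw [pvSq_cons_scan t '/']
      rw [show pvScan '/' ('/' :: t) = pvScan '/' t from by simp [pvScan]]
    · rw [if_pos hsw, pvSq_cons_scan v '/']
  have hdd : pvDD ('/' :: pvScan '/' v) = false := pvDD_scan v '/'
  rcases List.eq_nil_or_concat (pvScan '/' v) with hnil | ⟨s', a, hcat⟩
  · rw [hnil] at hw ⊢
    by_cases hv : v = []
    · rw [if_pos hv]
      simp
      rfl
    · rw [if_neg hv, hw]
      rw [show (['/'] : List Char) = [] ++ ['/'] from rfl, pvRstrip_concat_slash, pvRstrip_nil]
      rw [if_pos rfl]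
      simp
      rfl
  · rw [List.concat_eq_append] at hcat
    have hv : v ≠ [] := by
      intro hv0
      rw [hv0] at hcat
      simp [pvScan] at hcat
    rw [hcat] at hdd
    rw [if_neg hv, hw, hcat]
    have hlast : (s' ++ [a]).getLastD '/' = a := by simp
    rw [hlast]
    by_cases ha : a = '/'
    · subst ha
      rcases List.eq_nil_or_concat s' with hnil' | ⟨s'', b, hcat'⟩
      · exfalso
        rw [hnil'] at hdd
        have h2 := pvDD_append_pair []
        rw [show ('/' : Char) :: ([] ++ ['/'] : List Char) = [] ++ ['/', '/'] from by simp] at hdd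
        rw [h2] at hdd
        simp at hdd
      · rw [List.concat_eq_append] at hcat'
        subst hcat'
        have hb : b ≠ '/' := by
          intro hbeq; subst hbeq
          have h2 := pvDD_append_pair ('/' :: s'')
          rw [show ('/' :: s'') ++ ['/','/'] = '/' :: ((s'' ++ ['/']) ++ ['/']) from by simp] at h2
          rw [h2] at hdd
          simp at hdd
        rw [show ('/' : Char) :: ((s'' ++ [b]) ++ ['/']) = (('/' :: (s'' ++ [b])) ++ ['/']) from by simp]
        rw [pvRstrip_concat_slash]
        rw [show ('/' : Char) :: (s'' ++ [b]) = ('/' :: s'') ++ [b] from by simp]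
        rw [pvRstrip_concat_ne _ b hb]
        rw [if_neg (by simp)]
        rw [if_pos (by refine ⟨rfl, ?_⟩; simp)]
        rw [pvSlice_neg_one _ (by simp)]
        congr 1
        rw [show ('/' : Char) :: s'' ++ [b] ++ ['/'] = (('/' :: s'' ++ [b]) ++ ['/']) from by simp,
          List.dropLast_concat]
    · rw [show ('/' : Char) :: (s' ++ [a]) = ('/' :: s') ++ [a] from by simp]
      rw [pvRstrip_concat_ne _ a ha]
      rw [if_neg (by simp)]
      rw [if_neg (fun hcon => ha hcon.1)]

-- ===== VERDICT (by name: the statement is the Claim_ definition above) =====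
theorem normalize_teldrive_path_py_spec : Claim_equal_normalize_teldrive_path_py := by
  intro path _
  unfold Spec_normalize_teldrive_path_py
  unfold normalize_teldrive_path_py normalize_teldrive_path_py_alt
  exact pvMain _
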